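-- pv_equiv track=rewrite | github.com/0pill2-hue/openclaw-invest-workspace | invest/scripts/scrape_plan.py | extract_buddies_from_snapshot
-- ===== SOURCE A (Python) =====
-- def extract_buddies_from_snapshot(snapshot_text, buddies, existing_ids):
--     new_count = 0
--     for line in snapshot_text.split('\n'):
--         if 'https://blog.naver.com/' in line and 'url:' in line:
--             try:
--                 url = line.split('url: ')[1].strip().strip('"').strip("'")
--                 if url.startswith('https://blog.naver.com/') and '?' not in url:
--                     blog_id = url.split('/')[-1]
--                     if blog_id not in existing_ids:
--                         buddies.append({'id': blog_id, 'url': url})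
--                         existing_ids.add(blog_id)
--                         new_count += 1
--             except: continue
--     return new_count
-- ===== SOURCE B (Python) =====
-- def extract_buddies_from_snapshot(snapshot_text, buddies, existing_ids):
--     # Phase 1: extract (blog_id, url) candidates from the snapshot, in order.
--     candidates = []
--     for line in snapshot_text.split('\n'):
--         if 'https://blog.naver.com/' not in line or 'url:' not in line:
--             continue
--         parts = line.split('url: ')
--         if len(parts) < 2:
--             continue
--         url = parts[1].strip().strip('"').strip("'")
--         if url.startswith('https://blog.naver.com/') and '?' not in url:
--             candidates.append((url.split('/')[-1], url))
--     # Phase 2: merge candidates not already known, counting the new ones.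
--     new_count = 0
--     for blog_id, url in candidates:
--         if blog_id not in existing_ids:
--             buddies.append({'id': blog_id, 'url': url})
--             existing_ids.add(blog_id)
--             new_count += 1
--     return new_count
-- ===== Notes on version B (the rewrite author's own statement) =====
-- stated objective: alternative
-- what changed: Splits A's single fused loop into two phases: a pure extraction pass that collects (id, url) candidates (with an explicit length check replacing the bare try/except) and a separate merge/dedup pass over the candidate list that updates existing_ids and counts new ids.
import Mathlib
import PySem

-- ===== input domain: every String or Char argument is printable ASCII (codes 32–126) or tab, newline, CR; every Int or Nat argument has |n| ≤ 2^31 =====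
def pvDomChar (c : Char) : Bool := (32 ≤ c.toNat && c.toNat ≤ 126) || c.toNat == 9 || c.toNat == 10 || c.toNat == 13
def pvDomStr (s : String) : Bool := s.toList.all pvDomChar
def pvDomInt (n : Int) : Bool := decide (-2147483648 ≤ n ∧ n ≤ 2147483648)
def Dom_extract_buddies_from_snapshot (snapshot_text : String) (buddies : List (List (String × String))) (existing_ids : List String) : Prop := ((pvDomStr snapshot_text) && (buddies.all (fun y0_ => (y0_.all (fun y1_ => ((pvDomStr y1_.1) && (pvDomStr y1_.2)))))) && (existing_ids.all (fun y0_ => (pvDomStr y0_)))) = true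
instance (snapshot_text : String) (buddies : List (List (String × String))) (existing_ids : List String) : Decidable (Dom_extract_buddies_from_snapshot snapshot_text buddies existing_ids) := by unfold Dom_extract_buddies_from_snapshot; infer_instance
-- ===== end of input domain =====

-- str.split(sep) for a non-empty literal sep, via PySem.Chars.splitOn (exact for sep ≠ "").
def pvSplit (s sep : String) : List String :=
  (PySem.Chars.splitOn s.toList sep.toList).map String.ofList

-- B separates A's fused loop into an extraction phase and a merge/dedup phase (same return
-- value; both Pythons mutate buddies/existing_ids identically, equivalence proved on the return value).

-- ===== PORT A =====
-- A's loop body over the state (new_count, existing_ids); the bare except catches the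
-- IndexError of line.split('url: ')[1], which pyGet? renders as `none` → skip.
def pvStepA (st : Int × List String) (line : String) : Int × List String :=
  if PySem.Str.isIn "https://blog.naver.com/" line && PySem.Str.isIn "url:" line then
    match PySem.List.pyGet? (pvSplit line "url: ") 1 with
    | none => st
    | some piece =>
      let url := PySem.Str.stripChars (PySem.Str.stripChars (PySem.Str.strip piece) "\"") "'"
      if PySem.Str.startswith url "https://blog.naver.com/" && !PySem.Str.isIn "?" url then
        match PySem.List.pyGet? (pvSplit url "/") (-1) with
        | none => st
        | some blog_id =>
          if PySem.Set.contains st.2 blog_id then st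
          else (st.1 + 1, PySem.Set.add st.2 blog_id)
      else st
  else st

def extract_buddies_from_snapshot (snapshot_text : String) (buddies : List (List (String × String))) (existing_ids : List String) : Int :=
  ((pvSplit snapshot_text "\n").foldl pvStepA (0, existing_ids)).1

-- ===== PORT B =====
-- Phase 1 per-line extraction: the guards of Source B, `continue` rendered as `none`.
def pvParseLine (line : String) : Option (String × String) :=
  if !(PySem.Str.isIn "https://blog.naver.com/" line && PySem.Str.isIn "url:" line) then none
  else
    let parts := pvSplit line "url: "
    if parts.length < 2 then none
    else
      let url := PySem.Str.stripChars (PySem.Str.stripChars (PySem.Str.strip (parts.getD 1 "")) "\"") "'"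
      if PySem.Str.startswith url "https://blog.naver.com/" && !PySem.Str.isIn "?" url then
        match PySem.List.pyGet? (pvSplit url "/") (-1) with
        | some blog_id => some (blog_id, url)
        | none => none
      else none

-- Phase 2 per-candidate merge step.
def pvMergeStep (st : Int × List String) (c : String × String) : Int × List String :=
  if PySem.Set.contains st.2 c.1 then st
  else (st.1 + 1, PySem.Set.add st.2 c.1)

def extract_buddies_from_snapshot_alt (snapshot_text : String) (buddies : List (List (String × String))) (existing_ids : List String) : Int :=
  let candidates := (pvSplit snapshot_text "\n").foldl
    (fun acc line => match pvParseLine line with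
      | some c => acc ++ [c]
      | none => acc) []
  (candidates.foldl pvMergeStep (0, existing_ids)).1

-- ===== PRECONDITION & SPEC =====
def Spec_extract_buddies_from_snapshot (snapshot_text : String) (buddies : List (List (String × String))) (existing_ids : List String) (out : Int) : Prop := out = extract_buddies_from_snapshot_alt snapshot_text buddies existing_ids
instance (snapshot_text : String) (buddies : List (List (String × String))) (existing_ids : List String) (out : Int) : Decidable (Spec_extract_buddies_from_snapshot snapshot_text buddies existing_ids out) := by unfold Spec_extract_buddies_from_snapshot; infer_instance

-- ===== CLAIM (what is proved, stated in full; the proofs are below) =====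
def Claim_equal_extract_buddies_from_snapshot : Prop := ∀ (snapshot_text : String) (buddies : List (List (String × String))) (existing_ids : List String), Dom_extract_buddies_from_snapshot snapshot_text buddies existing_ids → Spec_extract_buddies_from_snapshot snapshot_text buddies existing_ids (extract_buddies_from_snapshot snapshot_text buddies existing_ids)

-- ===== LEMMAS AND PROOFS =====

-- A's fused step is "parse, then merge".
lemma pvStepA_eq (st : Int × List String) (line : String) :
    pvStepA st line = match pvParseLine line with
      | none => st
      | some c => pvMergeStep st c := by
  unfold pvStepA pvParseLine pvMergeStep
  by_cases hg : (PySem.Str.isIn "https://blog.naver.com/" line && PySem.Str.isIn "url:" line) = true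
  · rw [hg]
    simp only [Bool.not_true, if_true, Bool.false_eq_true, if_false]
    generalize pvSplit line "url: " = parts
    match parts with
    | [] => simp [PySem.List.pyGet?, PySem.List.pyIdx?]
    | [a] => simp [PySem.List.pyGet?, PySem.List.pyIdx?]
    | a :: b :: t =>
      have h1 : PySem.List.pyGet? (a :: b :: t) 1 = some b := by
        simp [PySem.List.pyGet?, PySem.List.pyIdx?]
      have h2 : ¬ (a :: b :: t).length < 2 := by simp
      have h3 : (a :: b :: t).getD 1 "" = b := rfl
      rw [h1]
      simp only [h2, if_false, h3]
      split
      next hcond =>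
        cases hm : PySem.List.pyGet?
            (pvSplit (PySem.Str.stripChars (PySem.Str.stripChars (PySem.Str.strip b) "\"") "'") "/") (-1) <;> rfl
      next hcond => rfl
  · rw [Bool.not_eq_true] at hg
    rw [hg]
    simp only [Bool.false_eq_true, if_false, Bool.not_false, if_true]

-- phase-1 accumulator = filterMap
lemma pvCollect_eq (lines : List String) (acc : List (String × String)) :
    lines.foldl (fun acc line => match pvParseLine line with
      | some c => acc ++ [c]
      | none => acc) acc = acc ++ lines.filterMap pvParseLine := by
  induction lines generalizing acc with
  | nil => simp
  | cons l ls ih =>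
    simp only [List.foldl_cons, List.filterMap_cons]
    cases h : pvParseLine l <;> simp [ih]

-- fold fusion
lemma pvFuse (lines : List String) (st : Int × List String) :
    (lines.filterMap pvParseLine).foldl pvMergeStep st = lines.foldl pvStepA st := by
  induction lines generalizing st with
  | nil => rfl
  | cons l ls ih =>
    simp only [List.filterMap_cons, List.foldl_cons, pvStepA_eq st l]
    cases h : pvParseLine l <;> simp [ih]

-- ===== VERDICT (by name: the statement is the Claim_ definition above) =====
theorem extract_buddies_from_snapshot_spec : Claim_equal_extract_buddies_from_snapshot := by
  intro snapshot_text buddies existing_ids _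
  unfold Spec_extract_buddies_from_snapshot extract_buddies_from_snapshot extract_buddies_from_snapshot_alt
  simp only [pvCollect_eq, List.nil_append]
  exact congrArg Prod.fst (pvFuse _ _).symm
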